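-- pv_equiv track=rewrite | github.com/L1m3Kun/AutoBaekJoon | 백준/Silver/2607. 비슷한 단어/비슷한 단어.py | solution
-- ===== SOURCE A (Python) =====
-- from collections import defaultdict
--
-- def solution(N:int, words:list) -> int:
--     cnt = 0
--     word = [defaultdict(int) for _ in range(N)]
--     for i in range(N):
--         for w in words[i]:
--             word[i][w] += 1
--     for i in range(1, N):
--         inw = 0
--         absi = 0
--         for j in word[0].keys():
--             word[i][j] -= word[0][j]
--         for j in word[i].values():
--             inw += j
--             absi += abs(j)
--             if absi > 2:
--                 break
--         else:
--             if abs(inw) <= 1: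
--                 cnt += 1
--
--     return cnt
-- ===== SOURCE B (Python) =====
-- def _merge_dist(a, b):
--     # a, b sorted lists of chars; total of |count_a(c) - count_b(c)| over all c
--     i = j = d = 0
--     while i < len(a) and j < len(b):
--         if a[i] == b[j]:
--             i += 1
--             j += 1
--         elif a[i] < b[j]:
--             d += 1
--             i += 1
--         else:
--             d += 1
--             j += 1
--     return d + (len(a) - i) + (len(b) - j)
--
--
-- def solution(N: int, words: list) -> int:
--     if N < 1:
--         return 0
--     base = sorted(words[0])
--     l0 = len(words[0])
--     cnt = 0
--     for i in range(1, N):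
--         w = words[i]
--         if abs(len(w) - l0) <= 1 and _merge_dist(base, sorted(w)) <= 2:
--             cnt += 1
--     return cnt
-- ===== Notes on version B (the rewrite author's own statement) =====
-- stated objective: faster
-- what changed: replaces A's per-word frequency dicts and break-out value scan by sorting each word's characters once and two-pointer merging the sorted lists to tally the letter-count distance directly
import Mathlib
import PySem

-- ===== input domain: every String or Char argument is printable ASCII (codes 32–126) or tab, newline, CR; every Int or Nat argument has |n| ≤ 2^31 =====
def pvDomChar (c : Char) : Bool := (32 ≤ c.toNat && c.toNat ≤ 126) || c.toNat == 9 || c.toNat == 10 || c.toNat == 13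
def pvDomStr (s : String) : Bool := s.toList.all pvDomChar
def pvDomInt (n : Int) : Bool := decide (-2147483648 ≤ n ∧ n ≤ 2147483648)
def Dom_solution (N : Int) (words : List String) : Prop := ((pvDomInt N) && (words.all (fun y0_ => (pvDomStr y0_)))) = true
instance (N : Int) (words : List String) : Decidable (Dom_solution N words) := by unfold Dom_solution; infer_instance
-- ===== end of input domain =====

-- B replaces A's per-word frequency dicts and break-out value scan by sorting each word once and
-- two-pointer merging the sorted character lists (objective: faster — measured).

-- ===== PORT A =====
-- word[i][w] += 1 over the characters of words[i] (defaultdict(int))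
def counterA (s : String) : PySem.Dict Char Int :=
  s.toList.foldl (fun d w => d.modify w 0 (fun v => v + 1)) PySem.Dict.empty

-- for j in word[0].keys(): word[i][j] -= word[0][j]
def subKeysA (d0 d : PySem.Dict Char Int) : PySem.Dict Char Int :=
  d0.keys.foldl (fun d j => d.modify j 0 (fun v => v - d0.getD j 0)) d

-- for j in word[i].values(): … if absi > 2: break   (none = the loop broke)
def valsLoopA : List Int → Int → Int → Option (Int × Int)
  | [], inw, absi => some (inw, absi)
  | j :: js, inw, absi =>
    let inw' := inw + j
    let absi' := absi + |j|
    if 2 < absi' then none else valsLoopA js inw' absi'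

-- body of 'for i in range(1, N)'
def stepA (d0 di : PySem.Dict Char Int) (cnt : Int) : Int :=
  match valsLoopA (subKeysA d0 di).values 0 0 with
  | none => cnt
  | some (inw, _absi) => if |inw| ≤ 1 then cnt + 1 else cnt

def solution (N : Int) (words : List String) : Int :=
  let word : List (PySem.Dict Char Int) :=
    (PySem.List.pyRange 0 N).map (fun i => counterA (PySem.List.pyGetD words i ""))
  (PySem.List.pyRange 1 N).foldl
    (fun cnt i =>
      stepA (PySem.List.pyGetD word 0 PySem.Dict.empty)
            (PySem.List.pyGetD word i PySem.Dict.empty) cnt) 0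

-- ===== PORT B =====
-- _merge_dist: two-pointer merge of two sorted char lists, counting unmatched characters
def mergeDist : List Char → List Char → Int
  | [], b => (b.length : Int)
  | a :: as', [] => ((a :: as').length : Int)
  | a :: as', b :: bs =>
    if a = b then mergeDist as' bs
    else if a < b then 1 + mergeDist as' (b :: bs)
    else 1 + mergeDist (a :: as') bs
  termination_by a b => a.length + b.length

def solution_alt (N : Int) (words : List String) : Int :=
  if N < 1 then 0
  else
    let base := PySem.List.sorted (PySem.List.pyGetD words 0 "").toList (fun c => c)
    let l0 := PySem.Str.len (PySem.List.pyGetD words 0 "")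
    (PySem.List.pyRange 1 N).foldl
      (fun cnt i =>
        let w := PySem.List.pyGetD words i ""
        if |PySem.Str.len w - l0| ≤ 1 ∧
            mergeDist base (PySem.List.sorted w.toList (fun c => c)) ≤ 2 then cnt + 1 else cnt) 0

-- ===== PRECONDITION & SPEC =====
-- A evaluates words[i] for every i < N, so it raises IndexError exactly when N > len(words).
def Pre_solution (N : Int) (words : List String) : Prop := N ≤ (words.length : Int)
instance (N : Int) (words : List String) : Decidable (Pre_solution N words) := by
  unfold Pre_solution; infer_instance

def pvWitness_solution : Int × List String := (3, ["head", "dahe", "deap"])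

def Spec_solution (N : Int) (words : List String) (out : Int) : Prop := out = solution_alt N words
instance (N : Int) (words : List String) (out : Int) : Decidable (Spec_solution N words out) := by
  unfold Spec_solution; infer_instance

-- ===== CLAIM (what is proved, stated in full; the proofs are below) =====
def Claim_equal_solution : Prop := ∀ (N : Int) (words : List String),
  Dom_solution N words → Pre_solution N words → Spec_solution N words (solution N words)

-- ===== LEMMAS AND PROOFS =====

theorem sum_abs_nonneg_int (vs : List Int) : 0 ≤ (vs.map (fun v => |v|)).sum := by
  apply List.sum_nonneg
  intro x hx
  simp only [List.mem_map] at hx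
  obtain ⟨v, _, rfl⟩ := hx
  exact abs_nonneg v

theorem valsLoopA_eq (vs : List Int) (inw absi : Int) (h : 0 ≤ absi) (h2 : absi ≤ 2) :
    valsLoopA vs inw absi =
      if 2 < absi + (vs.map (fun v => |v|)).sum then none
      else some (inw + vs.sum, absi + (vs.map (fun v => |v|)).sum) := by
  induction vs generalizing inw absi with
  | nil =>
    rw [if_neg (by simp; omega)]
    simp [valsLoopA]
  | cons j js ih =>
    simp only [valsLoopA, List.map_cons, List.sum_cons]
    have hja := abs_nonneg j
    have hjs := sum_abs_nonneg_int js
    by_cases hb : 2 < absi + |j|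
    · rw [if_pos hb, if_pos (by omega)]
    · rw [if_neg hb, ih (inw + j) (absi + |j|) (by omega) (by omega)]
      split_ifs with h1 h2' <;> try omega
      · rfl
      · simp only [Option.some.injEq, Prod.mk.injEq]
        omega

theorem getD_foldl_sub (K : List Char) (hK : K.Nodup) (g : Char → Int)
    (d : PySem.Dict Char Int) (c : Char) :
    (K.foldl (fun d j => d.modify j 0 (fun v => v - g j)) d).getD c 0 =
      d.getD c 0 - (if c ∈ K then g c else 0) := by
  induction K generalizing d with
  | nil => simp
  | cons k K ih =>
    simp only [List.foldl_cons]
    rw [ih (by exact hK.of_cons)]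
    rw [PySem.Dict.getD_modify]
    have hk : k ∉ K := (List.nodup_cons.mp hK).1
    by_cases hck : c = k
    · subst hck
      simp [hk]
    · simp [hck, List.mem_cons]

theorem sum_count_multiset (F : Finset Char) (m : Multiset Char) (h : ∀ c ∈ m, c ∈ F) :
    (∑ c ∈ F, m.count c) = Multiset.card m := by
  have hsub : m.toFinset ⊆ F := fun c hc => h c (Multiset.mem_toFinset.mp hc)
  rw [← Finset.sum_subset hsub (by
    intro c _ hc
    simp only [Multiset.mem_toFinset] at hc
    simp [Multiset.count_eq_zero_of_notMem hc])]
  exact Multiset.toFinset_sum_count_eq m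

theorem sum_count_list (F : Finset Char) (l : List Char) (h : ∀ c ∈ l, c ∈ F) :
    (∑ c ∈ F, (l.count c : Int)) = (l.length : Int) := by
  have hm : (∑ c ∈ F, Multiset.count c (l : Multiset Char)) = Multiset.card (l : Multiset Char) :=
    sum_count_multiset F l (by simpa using h)
  simp only [Multiset.coe_count, Multiset.coe_card] at hm
  rw [← hm]
  push_cast
  rfl


theorem abs_cast_split (a b : ℕ) :
    |(a : ℤ) - (b : ℤ)| = ((a - b : ℕ) : ℤ) + ((b - a : ℕ) : ℤ) := by
  rcases le_total a b with h | h
  · rw [abs_of_nonpos (by omega)]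
    omega
  · rw [abs_of_nonneg (by omega)]
    omega

theorem cons_sub_notMem (x : Char) (s t : Multiset Char) (hx : x ∉ t) :
    (x ::ₘ s) - t = x ::ₘ (s - t) := by
  ext a
  simp only [Multiset.count_sub, Multiset.count_cons]
  by_cases hax : a = x
  · subst hax
    rw [Multiset.count_eq_zero.mpr hx]
    omega
  · simp [hax]

theorem mergeDist_eq (xs ys : List Char)
    (hx : xs.Pairwise (· ≤ ·)) (hy : ys.Pairwise (· ≤ ·)) :
    mergeDist xs ys =
      ((Multiset.card ((xs : Multiset Char) - (ys : Multiset Char)) +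
        Multiset.card ((ys : Multiset Char) - (xs : Multiset Char)) : ℕ) : ℤ) := by
  revert hx hy
  fun_induction mergeDist xs ys with
  | case1 b =>
    intro _ _
    simp
  | case2 a as' =>
    intro _ _
    simp
  | case3 as' b bs ih =>
    intro hx hy
    rw [ih hx.of_cons hy.of_cons]
    have h1 : ((b :: as' : List Char) : Multiset Char) - ((b :: bs : List Char) : Multiset Char)
        = ((as' : Multiset Char) - (bs : Multiset Char)) := by
      rw [← Multiset.cons_coe, ← Multiset.cons_coe, Multiset.sub_cons, Multiset.erase_cons_head]
    have h2 : ((b :: bs : List Char) : Multiset Char) - ((b :: as' : List Char) : Multiset Char)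
        = ((bs : Multiset Char) - (as' : Multiset Char)) := by
      rw [← Multiset.cons_coe, ← Multiset.cons_coe, Multiset.sub_cons, Multiset.erase_cons_head]
    rw [h1, h2]
  | case4 a as' b bs hab hlt ih =>
    intro hx hy
    rw [ih hx.of_cons hy]
    have hnm : a ∉ ((b :: bs : List Char) : Multiset Char) := by
      intro hmem
      rw [Multiset.mem_coe, List.mem_cons] at hmem
      rcases hmem with h | h
      · exact hab h
      · exact absurd (List.rel_of_pairwise_cons hy h) (by
          intro hba
          exact absurd (lt_of_lt_of_le hlt hba) (lt_irrefl a))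
    have h1 : ((a :: as' : List Char) : Multiset Char) - ((b :: bs : List Char) : Multiset Char)
        = a ::ₘ ((as' : Multiset Char) - ((b :: bs : List Char) : Multiset Char)) := by
      rw [← Multiset.cons_coe]
      exact cons_sub_notMem a _ _ hnm
    have h2 : ((b :: bs : List Char) : Multiset Char) - ((a :: as' : List Char) : Multiset Char)
        = ((b :: bs : List Char) : Multiset Char) - ((as' : List Char) : Multiset Char) := by
      rw [← Multiset.cons_coe (a := a), Multiset.sub_cons, Multiset.erase_of_notMem hnm]
    rw [h1, h2]
    simp only [Multiset.card_cons]
    push_cast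
    ring
  | case5 a as' b bs hab hlt ih =>
    intro hx hy
    rw [ih hx hy.of_cons]
    have hgt : b < a := by
      rcases lt_trichotomy a b with h | h | h
      · exact absurd h hlt
      · exact absurd h hab
      · exact h
    have hnm : b ∉ ((a :: as' : List Char) : Multiset Char) := by
      intro hmem
      rw [Multiset.mem_coe, List.mem_cons] at hmem
      rcases hmem with h | h
      · exact absurd h (by intro he; subst he; exact lt_irrefl b hgt)
      · exact absurd (List.rel_of_pairwise_cons hx h) (by
          intro hba
          exact absurd (lt_of_lt_of_le hgt hba) (lt_irrefl b))
    have h1 : ((b :: bs : List Char) : Multiset Char) - ((a :: as' : List Char) : Multiset Char)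
        = b ::ₘ ((bs : Multiset Char) - ((a :: as' : List Char) : Multiset Char)) := by
      rw [← Multiset.cons_coe]
      exact cons_sub_notMem b _ _ hnm
    have h2 : ((a :: as' : List Char) : Multiset Char) - ((b :: bs : List Char) : Multiset Char)
        = ((a :: as' : List Char) : Multiset Char) - ((bs : List Char) : Multiset Char) := by
      rw [← Multiset.cons_coe (a := b), Multiset.sub_cons, Multiset.erase_of_notMem hnm]
    rw [h1, h2]
    simp only [Multiset.card_cons]
    push_cast
    ring

-- the per-pair condition: A's dict computation vs B's sorted-merge computation
theorem pair_step (s t : List Char) (c : Int) :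
    stepA (PySem.Dict.counter s) (PySem.Dict.counter t) c =
      if |(t.length : ℤ) - (s.length : ℤ)| ≤ 1 ∧
          mergeDist (PySem.List.sorted s (fun x => x)) (PySem.List.sorted t (fun x => x)) ≤ 2
        then c + 1 else c := by
  have hfold : subKeysA (PySem.Dict.counter s) (PySem.Dict.counter t)
      = (PySem.Dict.counter s).keys.foldl
          (fun d j => d.modify j 0 (fun v => v - (s.count j : ℤ))) (PySem.Dict.counter t) := by
    unfold subKeysA
    refine PySem.List.foldl_congr_mem _ _ _ _ ?_
    intro acc x _
    rw [PySem.Dict.getD_counter]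
  have hK2nd : (PySem.Set.update (PySem.Set.ofList t) (PySem.Set.ofList s)).Nodup :=
    PySem.Set.nodup_update _ _ (PySem.Set.nodup_ofList t)
  have hkeys : (subKeysA (PySem.Dict.counter s) (PySem.Dict.counter t)).keys
      = PySem.Set.update (PySem.Set.ofList t) (PySem.Set.ofList s) := by
    rw [hfold,
      PySem.Dict.keys_foldl_modify ((PySem.Dict.counter s).keys) 0
        (fun _d j => (fun v => v - (s.count j : ℤ))) (PySem.Dict.counter t),
      PySem.Dict.keys_counter, PySem.Dict.keys_counter]
  have hgetD : ∀ cc, (subKeysA (PySem.Dict.counter s) (PySem.Dict.counter t)).getD cc 0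
      = (t.count cc : ℤ) - (s.count cc : ℤ) := by
    intro cc
    rw [hfold, getD_foldl_sub _ (by rw [PySem.Dict.keys_counter]; exact PySem.Set.nodup_ofList s) _ _ _,
      PySem.Dict.getD_counter, PySem.Dict.keys_counter]
    by_cases hcs : cc ∈ s
    · rw [if_pos ((PySem.Set.mem_ofList s cc).mpr hcs)]
    · rw [if_neg (fun hmem => hcs ((PySem.Set.mem_ofList s cc).mp hmem)),
        List.count_eq_zero.mpr hcs]
      simp
  have hvals : (subKeysA (PySem.Dict.counter s) (PySem.Dict.counter t)).values
      = (PySem.Set.update (PySem.Set.ofList t) (PySem.Set.ofList s)).map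
          (fun cc => (t.count cc : ℤ) - (s.count cc : ℤ)) := by
    rw [PySem.Dict.values_eq_map_keys _ (by rw [hkeys]; exact hK2nd) 0, hkeys]
    exact List.map_congr_left (fun cc _ => hgetD cc)
  set K2 := PySem.Set.update (PySem.Set.ofList t) (PySem.Set.ofList s) with hK2def
  have hmemF : ∀ cc : Char, cc ∈ s ∨ cc ∈ t → cc ∈ K2.toFinset := by
    intro cc hcc
    rw [List.mem_toFinset, hK2def, PySem.Set.mem_update]
    rcases hcc with h | h
    · exact Or.inr ((PySem.Set.mem_ofList s cc).mpr h)
    · exact Or.inl ((PySem.Set.mem_ofList t cc).mpr h)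
  have hsum : (K2.map (fun cc => (t.count cc : ℤ) - (s.count cc : ℤ))).sum
      = (t.length : ℤ) - (s.length : ℤ) := by
    rw [← List.sum_toFinset _ hK2nd, Finset.sum_sub_distrib,
      sum_count_list _ t (fun cc hc => hmemF cc (Or.inr hc)),
      sum_count_list _ s (fun cc hc => hmemF cc (Or.inl hc))]
  have hpart : ∀ (u v : List Char), (∀ cc : Char, cc ∈ u → cc ∈ K2.toFinset) →
      (∑ cc ∈ K2.toFinset, ((u.count cc - v.count cc : ℕ) : ℤ))
        = (Multiset.card ((u : Multiset Char) - (v : Multiset Char)) : ℤ) := by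
    intro u v hu
    rw [← Nat.cast_sum]
    congr 1
    have hpt : ∀ cc ∈ K2.toFinset, u.count cc - v.count cc
        = Multiset.count cc ((u : Multiset Char) - (v : Multiset Char)) := by
      intro cc _
      rw [Multiset.count_sub]
      simp
    rw [Finset.sum_congr rfl hpt]
    exact sum_count_multiset _ _ (fun cc hcc => hu cc (by
      have : cc ∈ (u : Multiset Char) := Multiset.mem_of_le tsub_le_self hcc
      simpa using this))
  have habs : ((K2.map (fun cc => (t.count cc : ℤ) - (s.count cc : ℤ))).map (fun v => |v|)).sum
      = ((Multiset.card ((t : Multiset Char) - (s : Multiset Char)) +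
          Multiset.card ((s : Multiset Char) - (t : Multiset Char)) : ℕ) : ℤ) := by
    rw [List.map_map]
    have hcomp : ((fun v : ℤ => |v|) ∘ fun cc => (t.count cc : ℤ) - (s.count cc : ℤ))
        = fun cc => ((t.count cc - s.count cc : ℕ) : ℤ) + ((s.count cc - t.count cc : ℕ) : ℤ) := by
      funext cc
      exact abs_cast_split _ _
    rw [hcomp, ← List.sum_toFinset _ hK2nd, Finset.sum_add_distrib,
      hpart t s (fun cc hc => hmemF cc (Or.inr hc)),
      hpart s t (fun cc hc => hmemF cc (Or.inl hc))]
    push_cast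
    ring
  have hB : mergeDist (PySem.List.sorted s (fun x => x)) (PySem.List.sorted t (fun x => x))
      = ((Multiset.card ((s : Multiset Char) - (t : Multiset Char)) +
          Multiset.card ((t : Multiset Char) - (s : Multiset Char)) : ℕ) : ℤ) := by
    have hbm : ((PySem.List.sorted s (fun x => x) : List Char) : Multiset Char) = (s : Multiset Char) :=
      Multiset.coe_eq_coe.mpr (PySem.List.sorted_perm s (fun x => x) false)
    have htm : ((PySem.List.sorted t (fun x => x) : List Char) : Multiset Char) = (t : Multiset Char) :=
      Multiset.coe_eq_coe.mpr (PySem.List.sorted_perm t (fun x => x) false)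
    rw [mergeDist_eq _ _ (PySem.List.sorted_pairwise s (fun x => x))
        (PySem.List.sorted_pairwise t (fun x => x)), hbm, htm]
  unfold stepA
  rw [hvals, valsLoopA_eq _ 0 0 le_rfl (by norm_num), habs, hsum]
  set D : ℕ := Multiset.card ((t : Multiset Char) - (s : Multiset Char)) +
      Multiset.card ((s : Multiset Char) - (t : Multiset Char)) with hDdef
  have hBD : mergeDist (PySem.List.sorted s (fun x => x)) (PySem.List.sorted t (fun x => x)) = (D : ℤ) := by
    rw [hB, hDdef]
    push_cast
    ring
  by_cases hD : 2 < (D : ℤ)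
  · rw [if_pos (by omega)]
    rw [if_neg (by
      rintro ⟨_, hm⟩
      rw [hBD] at hm
      omega)]
  · rw [if_neg (by omega)]
    show (if |0 + ((t.length : ℤ) - (s.length : ℤ))| ≤ 1 then c + 1 else c) = _
    rw [zero_add]
    by_cases hL : |(t.length : ℤ) - (s.length : ℤ)| ≤ 1
    · rw [if_pos hL, if_pos ⟨hL, by rw [hBD]; omega⟩]
    · rw [if_neg hL, if_neg (by rintro ⟨hl, _⟩; exact hL hl)]

-- ===== VERDICT (by name: the statement is the Claim_ definition above) =====
theorem solution_spec : Claim_equal_solution := by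
  intro N words _ _
  unfold Spec_solution solution solution_alt
  by_cases hN : N < 1
  · rw [if_pos hN, PySem.List.pyRange_one_eq_nil (by omega : N ≤ 1)]
    simp
  · rw [if_neg hN]
    refine PySem.List.foldl_congr_mem _ _ _ _ ?_
    intro cnt i hi
    rw [PySem.List.mem_pyRange_one] at hi
    rw [PySem.List.pyGetD_map_pyRange_of_nonneg
        (fun j => counterA (PySem.List.pyGetD words j "")) N i PySem.Dict.empty
        (by omega) (by omega),
      PySem.List.pyGetD_map_pyRange_of_nonneg
        (fun j => counterA (PySem.List.pyGetD words j "")) N 0 PySem.Dict.empty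
        (by omega) (by omega)]
    have hc : ∀ w : String, counterA w = PySem.Dict.counter w.toList := by
      intro w
      rw [PySem.Dict.counter_eq_foldl]
      rfl
    rw [hc, hc]
    have hlen : ∀ w : String, PySem.Str.len w = (w.toList.length : ℤ) := by
      intro w
      simp [PySem.Str.len]
    rw [pair_step (PySem.List.pyGetD words 0 "").toList (PySem.List.pyGetD words i "").toList cnt]
    simp only [hlen]
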